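-- pv_equiv track=rewrite | github.com/kritishmohapatra/GFG_SOLUTIONS | Difficulty: Medium/Group Balls by Sequence/group-balls-by-sequence.py | validgroup
-- ===== SOURCE A (Python) =====
-- from collections import Counter
--
-- def validgroup(arr ,k):
--     # Code here
--     mp=Counter(arr)
--     if len(arr)%k!=0:
--         return False
--     arr.sort()
--     for i in range(len(arr)):
--         if mp[arr[i]]==0:
--             continue
--         for j in range(k):
--             if mp[arr[i]+j]==0:
--                 return False
--             mp[arr[i]+j]-=1
--     return True
-- ===== SOURCE B (Python) =====
-- from collections import Counter
--
-- # B: single pass over the sorted distinct values maintaining the list of still-open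
-- # group starts (a sliding window), instead of A's per-ball decrement greedy.
-- # Like A, it sorts arr in place; the proved equivalence is about the return value.
-- def validgroup(arr, k):
--     if len(arr) % k != 0:
--         return False
--     arr.sort()
--     mp = Counter(arr)
--     open_runs = []          # pairs (u, s): s groups begun at value u, still running
--     prev = None
--     for v in sorted(mp):
--         if open_runs and v != prev + 1:
--             return False    # running groups need value prev+1, which is absent
--         s = mp[v] - sum(cnt for _, cnt in open_runs)
--         if s < 0:
--             return False    # fewer balls of value v than groups that must cover it
--         if s > 0:
--             open_runs.append((v, s))
--         open_runs = [(u, cnt) for u, cnt in open_runs if u + k - 1 > v]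
--         prev = v
--     return not open_runs
-- ===== Notes on version B (the rewrite author's own statement) =====
-- stated objective: faster
-- what changed: B drops A's per-ball decrement greedy (scan every sorted element, walk j=0..k-1 decrementing Counter entries) for a single pass over the sorted distinct values that maintains a sliding window of still-open group starts: at each value it checks consecutiveness, subtracts the open-start demand from the value's count to get the new starts, and prunes starts whose k-window has closed, never mutating the counter.
import Mathlib
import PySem

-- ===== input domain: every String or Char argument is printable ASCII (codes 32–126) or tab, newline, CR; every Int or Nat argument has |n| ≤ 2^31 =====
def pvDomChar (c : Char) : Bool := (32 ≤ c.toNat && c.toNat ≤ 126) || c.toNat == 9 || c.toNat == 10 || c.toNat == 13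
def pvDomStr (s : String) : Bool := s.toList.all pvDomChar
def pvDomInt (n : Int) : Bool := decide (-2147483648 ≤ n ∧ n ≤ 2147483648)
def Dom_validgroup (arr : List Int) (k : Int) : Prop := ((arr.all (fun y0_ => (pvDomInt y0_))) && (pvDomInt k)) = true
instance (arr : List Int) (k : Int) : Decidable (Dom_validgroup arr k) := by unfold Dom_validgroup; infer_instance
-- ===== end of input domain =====

-- B replaces A's per-ball decrement greedy with a single pass over the sorted distinct
-- values maintaining a sliding window of still-open group starts (no counter mutation);
-- both Pythons sort arr in place, and the equivalence proved is about the return value.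

-- ===== PORT A =====
-- inner loop 'for j in range(k)': check mp[v+j]==0 -> fail, else decrement by 1
def pvAInner (mp : PySem.Dict Int Int) (v j : Int) (fuel : Nat) : Option (PySem.Dict Int Int) :=
  match fuel with
  | 0 => some mp
  | n+1 =>
    if mp.getD (v + j) 0 == 0 then none
    else pvAInner (mp.insert (v + j) (mp.getD (v + j) 0 - 1)) v (j + 1) n

-- outer loop 'for i in range(len(arr))' over the sorted list, with early return False
def pvAOuter (mp : PySem.Dict Int Int) (rest : List Int) (k : Int) : Bool :=
  match rest with
  | [] => true
  | v :: rest =>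
    if mp.getD v 0 == 0 then pvAOuter mp rest k
    else
      match pvAInner mp v 0 k.toNat with
      | none => false
      | some mp' => pvAOuter mp' rest k

def validgroup (arr : List Int) (k : Int) : Bool :=
  let mp := PySem.Dict.counter arr
  if PySem.Int.mod (arr.length : Int) k ≠ 0 then false
  else pvAOuter mp (PySem.List.sorted arr (fun x => x) false) k

-- ===== PORT B =====
-- 'for v in sorted(mp)': gap check, s = mp[v] - sum(open), append start, drop closed runs
def pvWin (mp : PySem.Dict Int Int) (k : Int) (opens : List (Int × Int)) (prev : Option Int)
    (ks : List Int) : Bool :=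
  match ks with
  | [] => opens.isEmpty       -- 'return not open_runs'
  | v :: rest =>
    if !opens.isEmpty && (match prev with | some p => v != p + 1 | none => true) then false
    else
      let s := mp.getD v 0 - (opens.map Prod.snd).sum
      if s < 0 then false
      else
        let opens1 := if s > 0 then opens ++ [(v, s)] else opens
        pvWin mp k (opens1.filter (fun us => decide (us.1 + k - 1 > v))) (some v) rest

def validgroup_alt (arr : List Int) (k : Int) : Bool :=
  if PySem.Int.mod (arr.length : Int) k ≠ 0 then false
  else
    let s := PySem.List.sorted arr (fun x => x) false
    let mp := PySem.Dict.counter s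
    pvWin mp k [] none (PySem.List.sorted mp.keys (fun x => x) false)

-- ===== PRECONDITION & SPEC =====
-- Pre_ excludes exactly k = 0, on which Python's 'len(arr) % k' raises ZeroDivisionError in both A and B.
def Pre_validgroup (arr : List Int) (k : Int) : Prop := k ≠ 0
instance (arr : List Int) (k : Int) : Decidable (Pre_validgroup arr k) := by unfold Pre_validgroup; infer_instance
def pvWitness_validgroup : List Int × Int := ([3, 2, 1, 2, 3, 4], 3)

def Spec_validgroup (arr : List Int) (k : Int) (out : Bool) : Prop := out = validgroup_alt arr k
instance (arr : List Int) (k : Int) (out : Bool) : Decidable (Spec_validgroup arr k out) := by unfold Spec_validgroup; infer_instance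

-- ===== CLAIM (what is proved, stated in full; the proofs are below) =====
def Claim_equal_validgroup : Prop := ∀ (arr : List Int) (k : Int), Dom_validgroup arr k → Pre_validgroup arr k → Spec_validgroup arr k (validgroup arr k)

-- ===== LEMMAS AND PROOFS =====

-- proof-internal intermediate: the BULK greedy over distinct keys (one subtraction of the
-- whole multiplicity per key); A is first reduced to it, then it is related to B's window.
def pvGInner (mp : PySem.Dict Int Int) (key cnt j : Int) (fuel : Nat) : Option (PySem.Dict Int Int) :=
  match fuel with
  | 0 => some mp
  | n+1 =>
    if mp.getD (key + j) 0 < cnt then none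
    else pvGInner (mp.insert (key + j) (mp.getD (key + j) 0 - cnt)) key cnt (j + 1) n

def pvGOuter (mp : PySem.Dict Int Int) (keys : List Int) (k : Int) : Bool :=
  match keys with
  | [] => true
  | key :: rest =>
    let cnt := mp.getD key 0
    if cnt ≤ 0 then pvGOuter mp rest k
    else
      match pvGInner mp key cnt 0 k.toNat with
      | none => false
      | some mp' => pvGOuter mp' rest k

-- A's inner loop fails iff some count in the window is 0
lemma pvAInner_eq_none_iff (mp : PySem.Dict Int Int) (v j : Int) (n : Nat) :
    pvAInner mp v j n = none ↔ ∃ i : Nat, i < n ∧ mp.getD (v + j + i) 0 = 0 := by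
  induction n generalizing mp j with
  | zero => simp [pvAInner]
  | succ n ih =>
    simp only [pvAInner]
    by_cases h : mp.getD (v + j) 0 = 0
    · simp only [h, beq_self_eq_true, if_true]
      constructor
      · intro _; exact ⟨0, by omega, by simpa using h⟩
      · intro _; trivial
    · rw [if_neg (by simpa using h), ih]
      constructor
      · rintro ⟨i, hi, hz⟩
        refine ⟨i + 1, by omega, ?_⟩
        rw [PySem.Dict.getD_insert_of_ne _ _ _ (by push_cast; omega)] at hz
        push_cast
        rw [show v + j + ((i:Int) + 1) = v + (j+1) + ↑i by ring]; exact hz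
      · rintro ⟨i, hi, hz⟩
        match i, hi with
        | 0, _ => simp at hz; exact absurd hz h
        | (i+1), hi =>
          refine ⟨i, by omega, ?_⟩
          rw [PySem.Dict.getD_insert_of_ne]
          · rw [show v + (j + 1) + ↑i = v + j + (↑i+1) by push_cast; ring]
            exact_mod_cast hz
          · push_cast; omega

-- A's inner loop, on success, decrements each count in the window by 1
lemma pvAInner_some (mp : PySem.Dict Int Int) (v j : Int) (n : Nat)
    (h : ∀ i : Nat, i < n → mp.getD (v + j + i) 0 ≠ 0) :
    ∃ mp', pvAInner mp v j n = some mp' ∧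
      ∀ x, mp'.getD x 0 = mp.getD x 0 - (if v + j ≤ x ∧ x < v + j + n then 1 else 0) := by
  induction n generalizing mp j with
  | zero =>
    refine ⟨mp, rfl, fun x => ?_⟩
    rw [if_neg (by push_cast; omega)]
    ring
  | succ n ih =>
    have h0 : mp.getD (v + j) 0 ≠ 0 := by simpa using h 0 (by omega)
    simp only [pvAInner, beq_iff_eq]
    rw [if_neg h0]
    obtain ⟨mp', hsome, hval⟩ := ih (mp.insert (v + j) (mp.getD (v + j) 0 - 1)) (j + 1)
      (fun i hi => by
        rw [PySem.Dict.getD_insert_of_ne _ _ _ (by push_cast; omega)]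
        have := h (i + 1) (by omega)
        rw [show v + (j + 1) + (i:Int) = v + j + ((i:Int) + 1) by ring]
        exact_mod_cast this)
    refine ⟨mp', hsome, fun x => ?_⟩
    rw [hval x]
    by_cases hx : x = v + j
    · subst hx
      rw [PySem.Dict.getD_insert_self]
      have h1 : ¬ (v + (j+1) ≤ v + j ∧ v + j < v + (j+1) + n) := by omega
      have h2 : v + j ≤ v + j ∧ v + j < v + j + (n+1 : Nat) := by push_cast; omega
      simp only [if_neg h1, if_pos h2]
      ring
    · rw [PySem.Dict.getD_insert_of_ne _ _ _ hx]
      by_cases hin : v + (j+1) ≤ x ∧ x < v + (j+1) + n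
      · have : v + j ≤ x ∧ x < v + j + (n+1 : Nat) := by push_cast at hin ⊢; omega
        simp only [if_pos hin, if_pos this]
      · have : ¬ (v + j ≤ x ∧ x < v + j + (n+1 : Nat)) := by
          push_cast at hin ⊢
          rcases (not_and_or.mp hin) with h' | h' <;> omega
        simp only [if_neg hin, if_neg this]

-- bulk inner loop fails iff some count in the window is below cnt
lemma pvGInner_eq_none_iff (mp : PySem.Dict Int Int) (key cnt j : Int) (n : Nat) :
    pvGInner mp key cnt j n = none ↔ ∃ i : Nat, i < n ∧ mp.getD (key + j + i) 0 < cnt := by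
  induction n generalizing mp j with
  | zero => simp [pvGInner]
  | succ n ih =>
    simp only [pvGInner]
    by_cases h : mp.getD (key + j) 0 < cnt
    · simp only [if_pos h]
      constructor
      · intro _; exact ⟨0, by omega, by simpa using h⟩
      · intro _; trivial
    · rw [if_neg h, ih]
      constructor
      · rintro ⟨i, hi, hz⟩
        refine ⟨i + 1, by omega, ?_⟩
        rw [PySem.Dict.getD_insert_of_ne _ _ _ (by push_cast; omega)] at hz
        push_cast
        rw [show key + j + ((i:Int) + 1) = key + (j+1) + ↑i by ring]
        exact hz
      · rintro ⟨i, hi, hz⟩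
        match i, hi with
        | 0, _ => simp at hz; exact absurd hz h
        | (i+1), hi =>
          refine ⟨i, by omega, ?_⟩
          rw [PySem.Dict.getD_insert_of_ne _ _ _ (by push_cast; omega)]
          rw [show key + (j + 1) + ↑i = key + j + (↑i+1) by push_cast; ring]
          exact_mod_cast hz

-- bulk inner loop, on success, subtracts cnt from each count in the window
lemma pvGInner_some (mp : PySem.Dict Int Int) (key cnt j : Int) (n : Nat)
    (h : ∀ i : Nat, i < n → ¬ mp.getD (key + j + i) 0 < cnt) :
    ∃ mp', pvGInner mp key cnt j n = some mp' ∧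
      ∀ x, mp'.getD x 0 = mp.getD x 0 - (if key + j ≤ x ∧ x < key + j + n then cnt else 0) := by
  induction n generalizing mp j with
  | zero =>
    refine ⟨mp, rfl, fun x => ?_⟩
    rw [if_neg (by push_cast; omega)]
    ring
  | succ n ih =>
    have h0 : ¬ mp.getD (key + j) 0 < cnt := by simpa using h 0 (by omega)
    simp only [pvGInner]
    rw [if_neg h0]
    obtain ⟨mp', hsome, hval⟩ := ih (mp.insert (key + j) (mp.getD (key + j) 0 - cnt)) (j + 1)
      (fun i hi => by
        rw [PySem.Dict.getD_insert_of_ne _ _ _ (by push_cast; omega)]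
        have := h (i + 1) (by omega)
        rw [show key + (j + 1) + (i:Int) = key + j + ((i:Int) + 1) by ring]
        exact_mod_cast this)
    refine ⟨mp', hsome, fun x => ?_⟩
    rw [hval x]
    by_cases hx : x = key + j
    · subst hx
      rw [PySem.Dict.getD_insert_self]
      have h1 : ¬ (key + (j+1) ≤ key + j ∧ key + j < key + (j+1) + n) := by omega
      have h2 : key + j ≤ key + j ∧ key + j < key + j + (n+1 : Nat) := by push_cast; omega
      simp only [if_neg h1, if_pos h2]
      ring
    · rw [PySem.Dict.getD_insert_of_ne _ _ _ hx]
      by_cases hin : key + (j+1) ≤ x ∧ x < key + (j+1) + n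
      · have : key + j ≤ x ∧ x < key + j + (n+1 : Nat) := by push_cast at hin ⊢; omega
        simp only [if_pos hin, if_pos this]
      · have : ¬ (key + j ≤ x ∧ x < key + j + (n+1 : Nat)) := by
          push_cast at hin ⊢
          rcases (not_and_or.mp hin) with h' | h' <;> omega
        simp only [if_neg hin, if_neg this]

-- c consecutive single runs of A's inner loop (what the duplicates of one value trigger)
def pvAIter (mp : PySem.Dict Int Int) (v : Int) (n : Nat) : Nat → Option (PySem.Dict Int Int)
  | 0 => some mp
  | c+1 =>
    match pvAInner mp v 0 n with
    | none => none
    | some mp' => pvAIter mp' v n c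

lemma pvAIter_spec (n : Nat) (c : Nat) : ∀ (mp : PySem.Dict Int Int) (v : Int),
    (∀ x, 0 ≤ mp.getD x 0) →
    if ∃ i : Nat, i < n ∧ mp.getD (v + i) 0 < (c : Int) then pvAIter mp v n c = none
    else ∃ mp', pvAIter mp v n c = some mp' ∧
      ∀ x, mp'.getD x 0 = mp.getD x 0 - (if v ≤ x ∧ x < v + n then (c : Int) else 0) := by
  induction c with
  | zero =>
    intro mp v hn
    rw [if_neg (by rintro ⟨i, hi, hlt⟩; have := hn (v + i); simp at hlt; omega)]
    exact ⟨mp, rfl, fun x => by split_ifs <;> ring⟩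
  | succ c ih =>
    intro mp v hn
    by_cases hz : ∃ i : Nat, i < n ∧ mp.getD (v + i) 0 = 0
    · have hnone : pvAInner mp v 0 n = none := by
        rw [pvAInner_eq_none_iff]
        obtain ⟨i, hi, h0⟩ := hz
        exact ⟨i, hi, by rwa [add_zero]⟩
      rw [if_pos ?side]
      case side =>
        obtain ⟨i, hi, h0⟩ := hz
        exact ⟨i, hi, by rw [h0]; push_cast; omega⟩
      simp [pvAIter, hnone]
    · push_neg at hz
      obtain ⟨mp', hsome, hval⟩ := pvAInner_some mp v 0 n
        (fun i hi => by rw [add_zero]; exact hz i hi)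
      have hval' : ∀ x, mp'.getD x 0 = mp.getD x 0 - (if v ≤ x ∧ x < v + n then 1 else 0) := by
        intro x; rw [hval x, add_zero]
      have hn' : ∀ x, 0 ≤ mp'.getD x 0 := by
        intro x
        rw [hval' x]
        split_ifs with hw
        · have h1 := hz (x - v).toNat (by omega)
          have h2 := hn x
          have : v + ((x - v).toNat : Int) = x := by omega
          rw [this] at h1
          omega
        · have := hn x; omega
      have hiter : pvAIter mp v n (c+1) = pvAIter mp' v n c := by
        simp [pvAIter, hsome]
      have hIH := ih mp' v hn'
      have hcond : (∃ i : Nat, i < n ∧ mp'.getD (v + i) 0 < (c : Int)) ↔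
          (∃ i : Nat, i < n ∧ mp.getD (v + i) 0 < ((c+1 : Nat) : Int)) := by
        constructor
        · rintro ⟨i, hi, hlt⟩
          refine ⟨i, hi, ?_⟩
          rw [hval' (v + i), if_pos (by push_cast; omega)] at hlt
          push_cast at hlt ⊢; omega
        · rintro ⟨i, hi, hlt⟩
          refine ⟨i, hi, ?_⟩
          rw [hval' (v + i), if_pos (by push_cast; omega)]
          push_cast at hlt ⊢; omega
      by_cases hc : ∃ i : Nat, i < n ∧ mp.getD (v + i) 0 < ((c+1 : Nat) : Int)
      · rw [if_pos hc, hiter]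
        have := ih mp' v hn'
        rw [if_pos (hcond.mpr hc)] at this
        exact this
      · rw [if_neg hc]
        have := ih mp' v hn'
        rw [if_neg (fun hcc => hc (hcond.mp hcc))] at this
        obtain ⟨mp'', hsome'', hval''⟩ := this
        refine ⟨mp'', by rw [hiter]; exact hsome'', fun x => ?_⟩
        rw [hval'' x, hval' x]
        split_ifs with hw
        · push_cast; ring
        · ring

-- with an empty window (k ≤ 0) A's loops are no-ops and A answers True
lemma pvAOuter_true_of_zero (mp : PySem.Dict Int Int) (l : List Int) (k : Int) (hk : k.toNat = 0) :
    pvAOuter mp l k = true := by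
  induction l generalizing mp with
  | nil => rfl
  | cons v rest ih =>
    simp only [pvAOuter, hk, pvAInner]
    split_ifs <;> exact ih _

-- A's outer loop over one block of m equal values = c := mp[v] single runs
lemma pvAOuter_block (v : Int) (k : Int) (rest : List Int) (m : Nat) :
    ∀ (mp : PySem.Dict Int Int), (∀ x, 0 ≤ mp.getD x 0) → mp.getD v 0 ≤ (m : Int) → 1 ≤ k →
    pvAOuter mp (List.replicate m v ++ rest) k =
      match pvAIter mp v k.toNat (mp.getD v 0).toNat with
      | none => false
      | some mp' => pvAOuter mp' rest k := by
  induction m with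
  | zero =>
    intro mp hn hm hk1
    have h0 : mp.getD v 0 = 0 := le_antisymm (by exact_mod_cast hm) (hn v)
    simp [h0, pvAIter]
  | succ m ih =>
    intro mp hn hm hk1
    have hkn : 1 ≤ k.toNat := by omega
    rw [List.replicate_succ, List.cons_append]
    by_cases h0 : mp.getD v 0 = 0
    · have : pvAOuter mp (v :: (List.replicate m v ++ rest)) k = pvAOuter mp (List.replicate m v ++ rest) k := by
        simp [pvAOuter, h0]
      rw [this, ih mp hn (by omega) hk1]
    · have hstep : pvAOuter mp (v :: (List.replicate m v ++ rest)) k =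
          match pvAInner mp v 0 k.toNat with
          | none => false
          | some mp' => pvAOuter mp' (List.replicate m v ++ rest) k := by
        simp only [pvAOuter, beq_iff_eq]
        rw [if_neg h0]
      have hct : (mp.getD v 0).toNat = ((mp.getD v 0).toNat - 1) + 1 := by
        have := hn v; omega
      by_cases hz : ∃ i : Nat, i < k.toNat ∧ mp.getD (v + i) 0 = 0
      · have hnone : pvAInner mp v 0 k.toNat = none := by
          rw [pvAInner_eq_none_iff]
          obtain ⟨i, hi, hzz⟩ := hz
          exact ⟨i, hi, by rwa [add_zero]⟩
        rw [hstep, hnone, hct]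
        simp [pvAIter, hnone]
      · push_neg at hz
        obtain ⟨mp', hsome, hval⟩ := pvAInner_some mp v 0 k.toNat
          (fun i hi => by rw [add_zero]; exact hz i hi)
        have hval' : ∀ x, mp'.getD x 0 = mp.getD x 0 - (if v ≤ x ∧ x < v + k.toNat then 1 else 0) := by
          intro x; rw [hval x, add_zero]
        have hn' : ∀ x, 0 ≤ mp'.getD x 0 := by
          intro x
          rw [hval' x]
          split_ifs with hw
          · have h1 := hz (x - v).toNat (by omega)
            have h2 := hn x
            have heq : v + ((x - v).toNat : Int) = x := by omega
            rw [heq] at h1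
            omega
          · have := hn x; omega
        have hv' : mp'.getD v 0 = mp.getD v 0 - 1 := by
          rw [hval' v, if_pos (by push_cast; omega)]
        rw [hstep, hsome]
        show pvAOuter mp' (List.replicate m v ++ rest) k = _
        rw [ih mp' hn' (by rw [hv']; push_cast at hm ⊢; omega) hk1, hct]
        have : pvAIter mp v k.toNat (((mp.getD v 0).toNat - 1) + 1) =
            pvAIter mp' v k.toNat ((mp.getD v 0).toNat - 1) := by
          simp [pvAIter, hsome]
        rw [this]
        have : (mp'.getD v 0).toNat = (mp.getD v 0).toNat - 1 := by
          rw [hv']; have := hn v; omega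
        rw [this]


-- bulk loops depend on mp only through getD
lemma pvGInner_congr (key cnt j : Int) (n : Nat) : ∀ (a b : PySem.Dict Int Int),
    (∀ x, a.getD x 0 = b.getD x 0) →
    (pvGInner a key cnt j n = none ∧ pvGInner b key cnt j n = none) ∨
    (∃ a' b', pvGInner a key cnt j n = some a' ∧ pvGInner b key cnt j n = some b' ∧
      ∀ x, a'.getD x 0 = b'.getD x 0) := by
  induction n generalizing j with
  | zero => exact fun a b h => Or.inr ⟨a, b, rfl, rfl, h⟩
  | succ n ih =>
    intro a b h
    simp only [pvGInner, h (key + j)]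
    by_cases hlt : b.getD (key + j) 0 < cnt
    · rw [if_pos hlt, if_pos hlt]; exact Or.inl ⟨rfl, rfl⟩
    · rw [if_neg hlt, if_neg hlt]
      refine ih _ _ _ (fun x => ?_)
      by_cases hx : x = key + j
      · subst hx
        rw [PySem.Dict.getD_insert_self, PySem.Dict.getD_insert_self]
      · rw [PySem.Dict.getD_insert_of_ne _ _ _ hx, PySem.Dict.getD_insert_of_ne _ _ _ hx]
        exact h x

lemma pvGOuter_congr (keys : List Int) (k : Int) : ∀ (a b : PySem.Dict Int Int),
    (∀ x, a.getD x 0 = b.getD x 0) → pvGOuter a keys k = pvGOuter b keys k := by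
  induction keys with
  | nil => intro a b h; rfl
  | cons v rest ih =>
    intro a b h
    simp only [pvGOuter, h v]
    by_cases hc : b.getD v 0 ≤ 0
    · rw [if_pos hc, if_pos hc]; exact ih _ _ h
    · rw [if_neg hc, if_neg hc]
      rcases pvGInner_congr v (b.getD v 0) 0 k.toNat a b h with ⟨ha, hb⟩ | ⟨a', b', ha, hb, h'⟩
      · rw [ha, hb]
      · rw [ha, hb]; exact ih _ _ h'

-- the first simulation: A over the sorted blocks = bulk greedy over the distinct keys
lemma pvMain (k : Int) (hk : 1 ≤ k) (mult : Int → Nat) : ∀ (ks : List Int) (mp : PySem.Dict Int Int),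
    (∀ x, 0 ≤ mp.getD x 0) → (∀ v ∈ ks, mp.getD v 0 ≤ (mult v : Int)) →
    pvAOuter mp (ks.flatMap (fun v => List.replicate (mult v) v)) k = pvGOuter mp ks k := by
  intro ks
  induction ks with
  | nil => intro mp _ _; rfl
  | cons v ks ih =>
    intro mp hn hinv
    have hn1 : 1 ≤ k.toNat := by omega
    rw [List.flatMap_cons]
    rw [pvAOuter_block v k _ (mult v) mp hn (hinv v (by simp)) hk]
    have hBstep : pvGOuter mp (v :: ks) k =
        if mp.getD v 0 ≤ 0 then pvGOuter mp ks k
        else match pvGInner mp v (mp.getD v 0) 0 k.toNat with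
          | none => false
          | some mp' => pvGOuter mp' ks k := rfl
    rw [hBstep]
    by_cases hc0 : mp.getD v 0 ≤ 0
    · have h0 : mp.getD v 0 = 0 := le_antisymm hc0 (hn v)
      rw [if_pos hc0, h0]
      show pvAOuter mp (ks.flatMap fun v => List.replicate (mult v) v) k = pvGOuter mp ks k
      exact ih mp hn (fun w hw => hinv w (by simp [hw]))
    · rw [if_neg hc0]
      have hcnt : ((mp.getD v 0).toNat : Int) = mp.getD v 0 := by have := hn v; omega
      have hspec := pvAIter_spec k.toNat (mp.getD v 0).toNat mp v hn
      by_cases hcond : ∃ i : Nat, i < k.toNat ∧ mp.getD (v + i) 0 < mp.getD v 0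
      · rw [if_pos (by obtain ⟨i, hi, hlt⟩ := hcond; exact ⟨i, hi, by rwa [hcnt]⟩)] at hspec
        rw [hspec]
        have hbnone : pvGInner mp v (mp.getD v 0) 0 k.toNat = none := by
          rw [pvGInner_eq_none_iff]
          obtain ⟨i, hi, hlt⟩ := hcond
          exact ⟨i, hi, by rwa [add_zero]⟩
        rw [hbnone]
      · rw [if_neg (by
          rintro ⟨i, hi, hlt⟩
          exact hcond ⟨i, hi, by rwa [hcnt] at hlt⟩)] at hspec
        obtain ⟨mpA, hsomeA, hvalA⟩ := hspec
        push_neg at hcond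
        obtain ⟨mpB, hsomeB, hvalB⟩ := pvGInner_some mp v (mp.getD v 0) 0 k.toNat
          (fun i hi => by rw [add_zero]; exact not_lt.mpr (le_of_not_gt (by exact fun hlt => absurd (hcond i hi) (not_le.mpr hlt))))
        rw [hsomeA, hsomeB]
        show pvAOuter mpA (ks.flatMap fun v => List.replicate (mult v) v) k = pvGOuter mpB ks k
        have hvalEq : ∀ x, mpA.getD x 0 = mpB.getD x 0 := by
          intro x
          rw [hvalA x, hvalB x, add_zero, hcnt]
        have hnA : ∀ x, 0 ≤ mpA.getD x 0 := by
          intro x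
          rw [hvalA x, hcnt]
          split_ifs with hw
          · have h1 := hcond (x - v).toNat (by omega)
            have heq : v + ((x - v).toNat : Int) = x := by omega
            rw [heq] at h1
            omega
          · have := hn x; omega
        have hinvA : ∀ w ∈ ks, mpA.getD w 0 ≤ (mult w : Int) := by
          intro w hw
          rw [hvalA w, hcnt]
          have := hinv w (by simp [hw])
          split_ifs with hww
          · have := hn v; omega
          · omega
        rw [ih mpA hnA hinvA]
        exact pvGOuter_congr ks k mpA mpB hvalEq


-- counts of the block decomposition
lemma pvCount_flatMap (x : Int) (m : Int → Nat) : ∀ (ks : List Int), ks.Nodup →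
    (ks.flatMap (fun v => List.replicate (m v) v)).count x = if x ∈ ks then m x else 0 := by
  intro ks
  induction ks with
  | nil => intro _; simp
  | cons v ks ih =>
    intro hnd
    rw [List.flatMap_cons, List.count_append, ih hnd.of_cons]
    by_cases hx : x = v
    · subst hx
      have hnm : x ∉ ks := by
        intro hmem
        exact (List.nodup_cons.mp hnd).1 hmem
      simp [List.count_replicate, hnm]
    · rw [List.count_replicate, if_neg (by simpa using Ne.symm hx)]
      by_cases hmem : x ∈ ks
      · simp [hmem, hx]
      · simp [hmem, hx]

lemma pvPairwise_blocks (m : Int → Nat) : ∀ ks : List Int, ks.Pairwise (· < ·) →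
    (ks.flatMap (fun v => List.replicate (m v) v)).Pairwise (· ≤ ·) := by
  intro ks
  induction ks with
  | nil => intro _; simp
  | cons v ks ih =>
    intro hpw
    rw [List.pairwise_cons] at hpw
    rw [List.flatMap_cons, List.pairwise_append]
    refine ⟨?_, ih hpw.2, ?_⟩
    · rw [List.pairwise_replicate]
      exact Or.inr le_rfl
    · intro a ha b hb
      rw [List.mem_replicate] at ha
      rw [List.mem_flatMap] at hb
      obtain ⟨w, hw, hbw⟩ := hb
      rw [List.mem_replicate] at hbw
      rw [ha.2, hbw.2]
      exact le_of_lt (hpw.1 w hw)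

-- the sorted list IS the block decomposition over its sorted distinct values
lemma pvSorted_decomp (arr : List Int) :
    PySem.List.sorted arr (fun x => x) false =
      (PySem.List.sorted (PySem.Set.ofList arr) (fun x => x) false).flatMap
        (fun v => List.replicate (arr.count v) v) := by
  have hks_nodup : (PySem.List.sorted (PySem.Set.ofList arr) (fun x => x) false).Nodup :=
    (PySem.List.sorted_perm (PySem.Set.ofList arr) (fun x => x) false).symm.nodup
      (PySem.Set.nodup_ofList arr)
  have hks_lt := PySem.List.sorted_ofList_pairwise_lt arr
  have hmem : ∀ x, x ∈ PySem.List.sorted (PySem.Set.ofList arr) (fun x => x) false ↔ x ∈ arr := by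
    intro x
    rw [PySem.List.mem_sorted, PySem.Set.mem_ofList]
  apply PySem.List.sorted_id_eq_of_perm_of_pairwise
  · rw [List.perm_iff_count]
    intro x
    rw [pvCount_flatMap x _ _ hks_nodup]
    by_cases hx : x ∈ arr
    · rw [if_pos ((hmem x).mpr hx)]
    · rw [if_neg (fun h => hx ((hmem x).mp h)), List.count_eq_zero_of_not_mem hx]
  · exact pvPairwise_blocks (fun v => arr.count v) _ hks_lt

-- ---- window-side vocabulary: active demand of the open starts at a value x ----
def pvActS (k : Int) (opens : List (Int × Int)) (x : Int) : Int :=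
  (opens.map (fun us => if x < us.1 + k then us.2 else 0)).sum

-- 'greater than the previous key' (no previous key = no constraint)
def pvGtP : Option Int → Int → Prop
  | none, _ => True
  | some p, x => p < x

lemma pvGtP_mono (prev : Option Int) (v x : Int) (h1 : pvGtP prev v) (h2 : v ≤ x) :
    pvGtP prev x := by
  cases prev with
  | none => trivial
  | some p => simp only [pvGtP] at *; omega

lemma pvActS_nil (k x : Int) : pvActS k [] x = 0 := rfl

lemma pvActS_append (k x : Int) (a b : List (Int × Int)) :
    pvActS k (a ++ b) x = pvActS k a x + pvActS k b x := by
  simp [pvActS]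

lemma pvActS_singleton (k x v s : Int) :
    pvActS k [(v, s)] x = if x < v + k then s else 0 := by
  simp [pvActS]

lemma pvActS_nonneg (k x : Int) (opens : List (Int × Int))
    (h : ∀ us ∈ opens, 0 < us.2) : 0 ≤ pvActS k opens x := by
  induction opens with
  | nil => simp [pvActS]
  | cons us rest ih =>
    have h1 := h us (by simp)
    have h2 := ih (fun w hw => h w (by simp [hw]))
    simp only [pvActS, List.map_cons, List.sum_cons] at *
    split_ifs <;> omega

lemma pvActS_filter (k v x : Int) (hx : v < x) (opens : List (Int × Int)) :
    pvActS k (opens.filter (fun us => decide (us.1 + k - 1 > v))) x = pvActS k opens x := by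
  induction opens with
  | nil => rfl
  | cons us rest ih =>
    by_cases hkeep : us.1 + k - 1 > v
    · rw [show (us :: rest).filter (fun us => decide (us.1 + k - 1 > v)) =
          us :: rest.filter (fun us => decide (us.1 + k - 1 > v)) by
            simp [List.filter_cons, hkeep]]
      simp only [pvActS, List.map_cons, List.sum_cons] at ih ⊢
      omega
    · rw [show (us :: rest).filter (fun us => decide (us.1 + k - 1 > v)) =
          rest.filter (fun us => decide (us.1 + k - 1 > v)) by
            simp [List.filter_cons, hkeep]]
      rw [ih]
      have hnc : ¬ x < us.1 + k := by omega
      simp only [pvActS, List.map_cons, List.sum_cons, if_neg hnc]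
      omega

lemma pvActS_all_cover (k x : Int) (opens : List (Int × Int))
    (h : ∀ us ∈ opens, x < us.1 + k) : pvActS k opens x = (opens.map Prod.snd).sum := by
  induction opens with
  | nil => rfl
  | cons us rest ih =>
    simp only [pvActS, List.map_cons, List.sum_cons] at *
    rw [if_pos (h us (by simp)), ih (fun w hw => h w (by simp [hw]))]

lemma pvWin_cons (mp : PySem.Dict Int Int) (k : Int) (opens : List (Int × Int))
    (prev : Option Int) (v : Int) (rest : List Int) :
    pvWin mp k opens prev (v :: rest) =
      if !opens.isEmpty && (match prev with | some p => v != p + 1 | none => true) then false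
      else if mp.getD v 0 - (opens.map Prod.snd).sum < 0 then false
      else pvWin mp k
        ((if mp.getD v 0 - (opens.map Prod.snd).sum > 0
            then opens ++ [(v, mp.getD v 0 - (opens.map Prod.snd).sum)] else opens).filter
          (fun us => decide (us.1 + k - 1 > v))) (some v) rest := rfl

-- the window loop depends on mp only through getD
lemma pvWin_congr (k : Int) : ∀ (ks : List Int) (a b : PySem.Dict Int Int)
    (opens : List (Int × Int)) (prev : Option Int),
    (∀ x, a.getD x 0 = b.getD x 0) → pvWin a k opens prev ks = pvWin b k opens prev ks := by
  intro ks
  induction ks with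
  | nil => intro a b opens prev h; rfl
  | cons v rest ih =>
    intro a b opens prev h
    rw [pvWin_cons, pvWin_cons, h v]
    split_ifs <;> first | rfl | exact ih a b _ _ h

-- with k ≤ 1 every start closes immediately: the window loop answers True
lemma pvWin_true_of_one (mp : PySem.Dict Int Int) (k : Int) (hk : k ≤ 1) :
    ∀ (ks : List Int) (prev : Option Int), (∀ v ∈ ks, 0 ≤ mp.getD v 0) →
    pvWin mp k [] prev ks = true := by
  intro ks
  induction ks with
  | nil => intro prev _; rfl
  | cons v rest ih =>
    intro prev hpos
    have h0 : 0 ≤ mp.getD v 0 := hpos v (by simp)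
    rw [pvWin_cons]
    rw [if_neg (by simp)]
    rw [if_neg (by simp only [List.map_nil, List.sum_nil]; omega)]
    have hnil : (if mp.getD v 0 - (([] : List (Int × Int)).map Prod.snd).sum > 0
        then ([] : List (Int × Int)) ++ [(v, mp.getD v 0 - (([] : List (Int × Int)).map Prod.snd).sum)]
        else ([] : List (Int × Int))).filter (fun us => decide (us.1 + k - 1 > v)) = [] := by
      split_ifs with hs
      · simp only [List.nil_append, List.filter]
        rw [show decide ((v, mp.getD v 0 - (([] : List (Int × Int)).map Prod.snd).sum).1 + k - 1 > v) = false by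
          simp only [decide_eq_false_iff_not] <;> omega]
      · rfl
    rw [hnil]
    exact ih _ (fun w hw => hpos w (by simp [hw]))

-- Lemma F: once some future value owes more to the open starts than it holds,
-- the window loop must answer False
lemma pvWin_false (mp0 : PySem.Dict Int Int) (k : Int)
    (hc0 : ∀ x, 0 ≤ mp0.getD x 0) :
    ∀ (ks : List Int) (opens : List (Int × Int)) (prev : Option Int),
    (∀ us ∈ opens, 0 < us.2 ∧ pvGtP prev (us.1 + k - 1)) →
    (prev = none → opens = []) →
    (∃ x, pvGtP prev x ∧ mp0.getD x 0 < pvActS k opens x) →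
    pvWin mp0 k opens prev ks = false := by
  intro ks
  induction ks with
  | nil =>
    rintro opens prev hopen hnone ⟨x, hgx, hlt⟩
    match opens with
    | [] => rw [pvActS_nil] at hlt; exact absurd hlt (not_lt.mpr (hc0 x))
    | us :: rest => rfl
  | cons v rest ih =>
    rintro opens prev hopen hnone ⟨x, hgx, hlt⟩
    have hne : opens ≠ [] := by
      rintro rfl
      rw [pvActS_nil] at hlt
      exact absurd hlt (not_lt.mpr (hc0 x))
    obtain ⟨p, rfl⟩ : ∃ p, prev = some p := by
      match prev with
      | none => exact absurd (hnone rfl) hne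
      | some p => exact ⟨p, rfl⟩
    rw [pvWin_cons]
    by_cases hv : v = p + 1
    case neg =>
      rw [if_pos (by simp [List.isEmpty_iff, hne, hv])]
    case pos =>
      rw [if_neg (by simp [hv])]
      have hcover : ∀ us ∈ opens, v < us.1 + k := by
        intro us hus
        have h2 := (hopen us hus).2
        simp only [pvGtP] at h2
        omega
      have hsum : (opens.map Prod.snd).sum = pvActS k opens v :=
        (pvActS_all_cover k v opens hcover).symm
      by_cases hs : mp0.getD v 0 - (opens.map Prod.snd).sum < 0
      · rw [if_pos hs]
      · rw [if_neg hs]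
        have hs0 : 0 ≤ mp0.getD v 0 - pvActS k opens v := by rw [← hsum]; omega
        have hxv : v < x := by
          simp only [pvGtP] at hgx
          rcases lt_trichotomy x v with h | h | h
          · omega
          · exfalso; subst h; omega
          · exact h
        apply ih
        · intro us hus
          rw [List.mem_filter] at hus
          refine ⟨?_, by simpa [pvGtP] using of_decide_eq_true hus.2⟩
          have hmem1 := hus.1
          split_ifs at hmem1 with hpos
          · rcases List.mem_append.mp hmem1 with h | h
            · exact (hopen us h).1
            · simp only [List.mem_singleton] at h
              rw [h]
              exact hpos
          · exact (hopen us hmem1).1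
        · intro h; exact absurd h (by simp)
        · refine ⟨x, by simpa [pvGtP] using hxv, ?_⟩
          rw [pvActS_filter k v x hxv]
          split_ifs with hpos
          · rw [pvActS_append, pvActS_singleton]
            split_ifs with hck
            · rw [hsum] at hpos; omega
            · omega
          · exact hlt

-- Lemma M: bulk greedy over the remaining keys = window loop, under the running invariants
lemma pvGOuter_eq_pvWin (mp0 : PySem.Dict Int Int) (k : Int) (hk : 1 ≤ k)
    (hc0 : ∀ x, 0 ≤ mp0.getD x 0) :
    ∀ (ks : List Int) (mp : PySem.Dict Int Int) (opens : List (Int × Int)) (prev : Option Int),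
    ks.Pairwise (· < ·) →
    (∀ v ∈ ks, pvGtP prev v) →
    (∀ us ∈ opens, 0 < us.2 ∧ pvGtP prev (us.1 + k - 1)) →
    (prev = none → opens = []) →
    (∀ us ∈ opens, ∀ x, pvGtP prev x → x ≤ us.1 + k - 1 → x ∈ ks) →
    (∀ x, pvGtP prev x → mp.getD x 0 = mp0.getD x 0 - pvActS k opens x) →
    (∀ x, pvGtP prev x → 0 ≤ mp.getD x 0) →
    (∀ x, pvGtP prev x → x ∉ ks → mp0.getD x 0 = 0) →
    pvGOuter mp ks k = pvWin mp0 k opens prev ks := by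
  have hkk : ((k.toNat : Int)) = k := Int.toNat_of_nonneg (by omega)
  intro ks
  induction ks with
  | nil =>
    intro mp opens prev _ _ hopen hnone hI5 _ _ _
    match opens, prev with
    | [], _ => rfl
    | us :: opens, none => exact absurd (hnone rfl) (by simp)
    | us :: opens, some p =>
      exfalso
      have h2 := (hopen us (by simp)).2
      simp only [pvGtP] at h2
      exact absurd (hI5 us (by simp) (p + 1) (by simp [pvGtP]) (by omega)) (by simp)
  | cons v rest ih =>
    intro mp opens prev hsort hgt hopen hnone hI5 hI2 hI6 hI3
    have hsort' := List.pairwise_cons.mp hsort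
    have hgtv : pvGtP prev v := hgt v (by simp)
    have hstep : (opens = []) ∨ ∃ p, prev = some p ∧ v = p + 1 := by
      match opens, prev with
      | [], _ => exact Or.inl rfl
      | us :: opens', none => exact absurd (hnone rfl) (by simp)
      | us :: opens', some p =>
        refine Or.inr ⟨p, rfl, ?_⟩
        have h2 := (hopen us (by simp)).2
        simp only [pvGtP] at h2 hgtv
        have hmem := hI5 us (by simp) (p + 1) (by simp [pvGtP]) (by omega)
        rcases List.mem_cons.mp hmem with h | h
        · omega
        · have := hsort'.1 _ h
          omega
    have hcover : ∀ us ∈ opens, v < us.1 + k := by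
      intro us hus
      rcases hstep with rfl | ⟨p, hp, rfl⟩
      · simp at hus
      · subst hp
        have h2 := (hopen us hus).2
        simp only [pvGtP] at h2
        omega
    have hsum : (opens.map Prod.snd).sum = pvActS k opens v :=
      (pvActS_all_cover k v opens hcover).symm
    have hcnt : mp.getD v 0 = mp0.getD v 0 - pvActS k opens v := hI2 v hgtv
    have hcnt0 : 0 ≤ mp.getD v 0 := hI6 v hgtv
    -- lift pvGtP over values beyond v
    have hlift : ∀ x, v ≤ x → pvGtP prev x := fun x hx => pvGtP_mono prev v x hgtv hx
    rw [pvWin_cons]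
    rw [if_neg (by
      rcases hstep with rfl | ⟨p, hp, rfl⟩
      · simp
      · subst hp; simp)]
    rw [if_neg (by rw [hsum, ← hcnt]; omega)]
    have hwin_s : mp0.getD v 0 - (opens.map Prod.snd).sum = mp.getD v 0 := by
      rw [hsum, ← hcnt]
    rw [hwin_s]
    have hGstep : pvGOuter mp (v :: rest) k =
        if mp.getD v 0 ≤ 0 then pvGOuter mp rest k
        else match pvGInner mp v (mp.getD v 0) 0 k.toNat with
          | none => false
          | some mp' => pvGOuter mp' rest k := rfl
    rw [hGstep]
    by_cases hz : mp.getD v 0 ≤ 0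
    · -- cnt = 0: bulk skips the key, the window appends no start
      rw [if_pos hz, if_neg (by omega)]
      apply ih mp _ (some v) hsort'.2
        (fun w hw => by simpa [pvGtP] using hsort'.1 w hw)
      · intro us hus
        rw [List.mem_filter] at hus
        exact ⟨(hopen us hus.1).1, by simpa [pvGtP] using of_decide_eq_true hus.2⟩
      · intro h; exact absurd h (by simp)
      · intro us hus x hgx hxle
        rw [List.mem_filter] at hus
        simp only [pvGtP] at hgx
        have hmem : x ∈ v :: rest := hI5 us hus.1 x (hlift x (by omega)) hxle
        rcases List.mem_cons.mp hmem with h | h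
        · omega
        · exact h
      · intro x hgx
        simp only [pvGtP] at hgx
        rw [hI2 x (hlift x (by omega)), pvActS_filter k v x hgx]
      · intro x hgx
        simp only [pvGtP] at hgx
        exact hI6 x (hlift x (by omega))
      · intro x hgx hxmem
        simp only [pvGtP] at hgx
        refine hI3 x (hlift x (by omega)) ?_
        intro h
        rcases List.mem_cons.mp h with h | h
        · omega
        · exact hxmem h
    · -- cnt > 0: bulk subtracts cnt over the window, the window opens a start (v, cnt)
      rw [if_neg hz, if_pos (by omega)]
      have hposA : 0 ≤ pvActS k opens v := pvActS_nonneg k v opens (fun us hus => (hopen us hus).1)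
      have hopens1 : ∀ us ∈ (opens ++ [(v, mp.getD v 0)]), 0 < us.2 := by
        intro us hus
        rcases List.mem_append.mp hus with h | h
        · exact (hopen us h).1
        · simp only [List.mem_singleton] at h
          rw [h]
          simpa using (by omega : 0 < mp.getD v 0)
      have hopen2 : ∀ us ∈ (opens ++ [(v, mp.getD v 0)]).filter (fun us => decide (us.1 + k - 1 > v)),
          0 < us.2 ∧ pvGtP (some v) (us.1 + k - 1) := by
        intro us hus
        rw [List.mem_filter] at hus
        exact ⟨hopens1 us hus.1, by simpa [pvGtP] using of_decide_eq_true hus.2⟩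
      have hact2 : ∀ x, v < x →
          pvActS k ((opens ++ [(v, mp.getD v 0)]).filter (fun us => decide (us.1 + k - 1 > v))) x =
            pvActS k opens x + (if x < v + k then mp.getD v 0 else 0) := by
        intro x hx
        rw [pvActS_filter k v x hx, pvActS_append, pvActS_singleton]
      by_cases hfail : pvGInner mp v (mp.getD v 0) 0 k.toNat = none
      · -- bulk fails: some value in the window is short; the window loop fails later
        rw [hfail]
        obtain ⟨i, hi, hlt⟩ := (pvGInner_eq_none_iff mp v (mp.getD v 0) 0 k.toNat).mp hfail
        simp only [add_zero, zero_add] at hlt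
        have hne0 : i ≠ 0 := by
          intro h
          rw [h] at hlt
          simp at hlt
        have hvx : v < v + (i : Int) := by omega
        refine (pvWin_false mp0 k hc0 rest _ (some v) hopen2 (by intro h; exact absurd h (by simp))
          ⟨v + (i : Int), by simpa [pvGtP] using hvx, ?_⟩).symm
        rw [hact2 _ hvx]
        have hik : ((i : Int)) < k := by omega
        rw [if_pos (by omega)]
        have := hI2 (v + (i : Int)) (hlift _ (by omega))
        omega
      · -- bulk succeeds: subtract cnt over the window and recurse in lockstep
        have hforall : ∀ i : Nat, i < k.toNat → ¬ mp.getD (v + 0 + (i : Int)) 0 < mp.getD v 0 := by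
          intro i hik hbad
          exact hfail ((pvGInner_eq_none_iff mp v (mp.getD v 0) 0 k.toNat).mpr ⟨i, hik, hbad⟩)
        obtain ⟨mp', hsome, hval⟩ := pvGInner_some mp v (mp.getD v 0) 0 k.toNat hforall
        simp only [add_zero, zero_add] at hval hforall
        rw [hkk] at hval
        rw [hsome]
        apply ih mp' _ (some v) hsort'.2
          (fun w hw => by simpa [pvGtP] using hsort'.1 w hw)
        · exact hopen2
        · intro h; exact absurd h (by simp)
        · -- I5: every value a surviving start still demands lies among the remaining keys
          intro us hus x hgx hxle
          rw [List.mem_filter] at hus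
          simp only [pvGtP] at hgx
          rcases List.mem_append.mp hus.1 with hmem | hmem
          · have hx : x ∈ v :: rest := hI5 us hmem x (hlift x (by omega)) hxle
            rcases List.mem_cons.mp hx with h | h
            · omega
            · exact h
          · simp only [List.mem_singleton] at hmem
            rw [hmem] at hxle
            simp only at hxle
            have hik : ((x - v).toNat : Int) = x - v := Int.toNat_of_nonneg (by omega)
            have hge : ¬ mp.getD x 0 < mp.getD v 0 := by
              have := hforall (x - v).toNat (by omega)
              rwa [show v + ((x - v).toNat : Int) = x by omega] at this
            have hpos0 : 0 < mp0.getD x 0 := by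
              have h2 := hI2 x (hlift x (by omega))
              have h3 : 0 ≤ pvActS k opens x :=
                pvActS_nonneg k x opens (fun w hw => (hopen w hw).1)
              omega
            by_contra hxr
            have : mp0.getD x 0 = 0 := hI3 x (hlift x (by omega)) (by
              intro h
              rcases List.mem_cons.mp h with h | h
              · omega
              · exact hxr h)
            omega
        · -- I2
          intro x hgx
          simp only [pvGtP] at hgx
          rw [hval x, hI2 x (hlift x (by omega)), hact2 x hgx]
          by_cases hxk : x < v + k
          · rw [if_pos ⟨by omega, hxk⟩, if_pos hxk]
            ring
          · rw [if_neg (by intro h; exact hxk h.2), if_neg hxk]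
            ring
        · -- I6
          intro x hgx
          simp only [pvGtP] at hgx
          rw [hval x]
          by_cases hxk : x < v + k
          · rw [if_pos ⟨by omega, hxk⟩]
            have hik : ((x - v).toNat : Int) = x - v := Int.toNat_of_nonneg (by omega)
            have := hforall (x - v).toNat (by omega)
            rw [show v + ((x - v).toNat : Int) = x by omega] at this
            omega
          · rw [if_neg (by intro h; exact hxk h.2)]
            have := hI6 x (hlift x (by omega))
            omega
        · -- I3
          intro x hgx hxmem
          simp only [pvGtP] at hgx
          refine hI3 x (hlift x (by omega)) ?_
          intro h
          rcases List.mem_cons.mp h with h | h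
          · omega
          · exact hxmem h

-- ===== VERDICT (by name: the statement is the Claim_ definition above) =====
theorem validgroup_spec : Claim_equal_validgroup := by
  intro arr k _ hk
  unfold Spec_validgroup validgroup validgroup_alt
  simp only []
  by_cases hmod : PySem.Int.mod (arr.length : Int) k ≠ 0
  · rw [if_pos hmod, if_pos hmod]
  · rw [if_neg hmod, if_neg hmod]
    by_cases hkpos : 1 ≤ k
    case neg =>
      have hk0 : k.toNat = 0 := by omega
      rw [pvAOuter_true_of_zero _ _ _ hk0]
      rw [pvWin_true_of_one _ _ (by omega) _ _
        (fun v _ => by rw [PySem.Dict.getD_counter]; positivity)]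
    case pos =>
      have hA : pvAOuter (PySem.Dict.counter arr) (PySem.List.sorted arr (fun x => x) false) k =
          pvGOuter (PySem.Dict.counter arr)
            (PySem.List.sorted (PySem.Set.ofList arr) (fun x => x) false) k := by
        rw [pvSorted_decomp arr]
        exact pvMain k hkpos (fun v => arr.count v) _ (PySem.Dict.counter arr)
          (fun x => by rw [PySem.Dict.getD_counter]; positivity)
          (fun v _ => by rw [PySem.Dict.getD_counter])
      rw [hA]
      have hGW : pvGOuter (PySem.Dict.counter arr)
            (PySem.List.sorted (PySem.Set.ofList arr) (fun x => x) false) k =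
          pvWin (PySem.Dict.counter arr) k [] none
            (PySem.List.sorted (PySem.Set.ofList arr) (fun x => x) false) := by
        apply pvGOuter_eq_pvWin (PySem.Dict.counter arr) k hkpos
          (fun x => by rw [PySem.Dict.getD_counter]; positivity)
        · exact PySem.List.sorted_ofList_pairwise_lt arr
        · intro v _; trivial
        · intro us h; simp at h
        · intro _; rfl
        · intro us h; simp at h
        · intro x _; rw [pvActS_nil]; ring
        · intro x _; rw [PySem.Dict.getD_counter]; positivity
        · intro x _ hx
          rw [PySem.Dict.getD_counter]
          have hxa : x ∉ arr := by
            intro hmem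
            exact hx (by rw [PySem.List.mem_sorted, PySem.Set.mem_ofList]; exact hmem)
          simp [List.count_eq_zero_of_not_mem hxa]
      rw [hGW]
      have hperm : (PySem.List.sorted arr (fun x => x) false).Perm arr :=
        PySem.List.sorted_perm arr (fun x => x) false
      have hkeys : PySem.List.sorted
            (PySem.Dict.counter (PySem.List.sorted arr (fun x => x) false)).keys (fun x => x) false =
          PySem.List.sorted (PySem.Set.ofList arr) (fun x => x) false := by
        rw [PySem.Dict.keys_counter]
        apply PySem.List.sorted_eq_sorted_of_perm _ _ _ (fun a b h => h)
        rw [List.perm_ext_iff_of_nodup (PySem.Set.nodup_ofList _) (PySem.Set.nodup_ofList _)]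
        intro x
        rw [PySem.Set.mem_ofList, PySem.Set.mem_ofList, List.Perm.mem_iff hperm]
      rw [hkeys]
      apply pvWin_congr
      intro x
      rw [PySem.Dict.getD_counter, PySem.Dict.getD_counter, hperm.count_eq x]
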